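-- pv_equiv track=rewrite | github.com/Daw-Jeong/Algorithm | 프로그래머스/lv0/120956. 옹알이 （1）/옹알이 （1）.py | solution
-- ===== SOURCE A (Python) =====
-- def solution(babbling):
--     cando = ["aya", "ye", "woo", "ma"]
--     count = 0
--
--     for bab in babbling:
--
--         while len(bab) >= 0:
--
--             if len(bab) == 0:
--                 count += 1
--                 break
--             elif len(bab) >= 3 and bab[:3] in cando:
--                 bab = bab[3:]
--             elif len(bab) >=2 and bab[:2] in cando:
--                 bab = bab[2:]
--             else:
--                 break
--
--     return count
-- ===== SOURCE B (Python) =====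
-- def solution(babbling):
--     # One-pass DFA over each string; "dead" is the trap state.
--     table = {
--         ("s0", 'a'): "a1", ("s0", 'w'): "w1", ("s0", 'y'): "y1", ("s0", 'm'): "m1",
--         ("a1", 'y'): "a2", ("a2", 'a'): "s0",
--         ("w1", 'o'): "w2", ("w2", 'o'): "s0",
--         ("y1", 'e'): "s0", ("m1", 'a'): "s0",
--     }
--     count = 0
--     for bab in babbling:
--         state = "s0"
--         for ch in bab:
--             state = table.get((state, ch), "dead")
--         if state == "s0":
--             count += 1
--     return count
-- ===== Notes on version B (the rewrite author's own statement) =====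
-- stated objective: alternative
-- what changed: Replaced A's repeated prefix-test-and-slice while loop with a single left-to-right pass of a finite-automaton transition table over each string, counting strings that end in the accepting state.
import Mathlib
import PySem

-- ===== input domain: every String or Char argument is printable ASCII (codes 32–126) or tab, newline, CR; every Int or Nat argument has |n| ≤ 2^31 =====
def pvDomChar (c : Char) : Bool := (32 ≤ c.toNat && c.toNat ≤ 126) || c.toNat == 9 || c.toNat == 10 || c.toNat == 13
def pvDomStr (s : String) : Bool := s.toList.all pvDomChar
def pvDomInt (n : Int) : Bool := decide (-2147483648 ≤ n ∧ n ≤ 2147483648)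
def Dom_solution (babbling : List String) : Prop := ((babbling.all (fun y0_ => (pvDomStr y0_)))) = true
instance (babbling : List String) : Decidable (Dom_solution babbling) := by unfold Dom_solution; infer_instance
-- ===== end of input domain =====

-- B replaces A's prefix-test-and-slice while loop by a single DFA pass per string (objective: alternative).

-- ===== PORT A =====
-- A's word list, as lists of chars (Python strings ↔ List Char)
def pvCando : List (List Char) := [['a','y','a'], ['y','e'], ['w','o','o'], ['m','a']]

-- A's inner while loop: strip a matching 3- or 2-char prefix, succeed on empty, else fail
def pvOkA (s : List Char) : Bool :=
  if s.length = 0 then true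
  else if 3 ≤ s.length ∧ s.take 3 ∈ pvCando then pvOkA (s.drop 3)
  else if 2 ≤ s.length ∧ s.take 2 ∈ pvCando then pvOkA (s.drop 2)
  else false
termination_by s.length
decreasing_by all_goals simp [List.length_drop]; omega

def solution (babbling : List String) : Int :=
  babbling.foldl (fun count bab => if pvOkA bab.toList then count + 1 else count) 0

-- ===== PORT B =====
inductive PvSt : Type
  | s0 | a1 | a2 | w1 | w2 | y1 | m1 | dead
deriving DecidableEq, Repr

-- B's transition table: table.get((st, c), "dead")
def pvStep (st : PvSt) (c : Char) : PvSt :=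
  match st with
  | .s0 => if c = 'a' then .a1 else if c = 'w' then .w1 else
           if c = 'y' then .y1 else if c = 'm' then .m1 else .dead
  | .a1 => if c = 'y' then .a2 else .dead
  | .a2 => if c = 'a' then .s0 else .dead
  | .w1 => if c = 'o' then .w2 else .dead
  | .w2 => if c = 'o' then .s0 else .dead
  | .y1 => if c = 'e' then .s0 else .dead
  | .m1 => if c = 'a' then .s0 else .dead
  | .dead => .dead

def solution_alt (babbling : List String) : Int :=
  babbling.foldl (fun count bab =>
    if bab.toList.foldl pvStep PvSt.s0 = PvSt.s0 then count + 1 else count) 0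

-- ===== PRECONDITION & SPEC =====
def Spec_solution (babbling : List String) (out : Int) : Prop := out = solution_alt babbling
instance (babbling : List String) (out : Int) : Decidable (Spec_solution babbling out) := by unfold Spec_solution; infer_instance

-- ===== CLAIM (what is proved, stated in full; the proofs are below) =====
def Claim_equal_solution : Prop := ∀ (babbling : List String), Dom_solution babbling → Spec_solution babbling (solution babbling)

-- ===== LEMMAS AND PROOFS =====
theorem pv_dead_run (l : List Char) : l.foldl pvStep PvSt.dead = PvSt.dead := by
  induction l with
  | nil => rfl
  | cons c t ih => simpa [pvStep] using ih

theorem pv_take3_shape (s : List Char) (x y z : Char) (h : s.take 3 = [x, y, z]) :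
    s = x :: y :: z :: s.drop 3 := by
  match s with
  | [] | [_] | [_, _] => simp at h
  | a :: b :: c :: t => simp_all

theorem pv_take2_shape (s : List Char) (x y : Char) (h : s.take 2 = [x, y]) :
    s = x :: y :: s.drop 2 := by
  match s with
  | [] | [_] => simp at h
  | a :: b :: t => simp_all

theorem pvOkA_eq_dfa (s : List Char) :
    pvOkA s = decide (s.foldl pvStep PvSt.s0 = PvSt.s0) := by
  fun_induction pvOkA s with
  | case1 s h0 =>
    have : s = [] := List.length_eq_zero_iff.mp h0
    simp [this]
  | case2 s h0 h3 ih =>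
    obtain ⟨hl, hm⟩ := h3
    -- s.take 3 has length 3, so it is "aya" or "woo"
    have hlen : (s.take 3).length = 3 := by simp [List.length_take]; omega
    simp only [pvCando, List.mem_cons, List.not_mem_nil, or_false] at hm
    rcases hm with h | h | h | h
    · have hs := pv_take3_shape s _ _ _ h
      rw [hs] at ih ⊢
      simpa [pvStep] using ih
    · rw [h] at hlen; simp at hlen
    · have hs := pv_take3_shape s _ _ _ h
      rw [hs] at ih ⊢
      simpa [pvStep] using ih
    · rw [h] at hlen; simp at hlen
  | case3 s h0 h3 h2 ih =>
    obtain ⟨hl, hm⟩ := h2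
    have hlen : (s.take 2).length = 2 := by simp [List.length_take]; omega
    simp only [pvCando, List.mem_cons, List.not_mem_nil, or_false] at hm
    rcases hm with h | h | h | h
    · rw [h] at hlen; simp at hlen
    · have hs := pv_take2_shape s _ _ h
      rw [hs] at ih ⊢
      simpa [pvStep] using ih
    · rw [h] at hlen; simp at hlen
    · have hs := pv_take2_shape s _ _ h
      rw [hs] at ih ⊢
      simpa [pvStep] using ih
  | case4 s h0 h3 h2 =>
    -- s nonempty, no valid prefix: the DFA cannot end in the accepting state
    match s with
    | [] => simp at h0
    | c :: t =>
      by_cases hca : c = 'a'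
      · subst hca
        match t with
        | [] => simp [pvStep]
        | d :: u =>
          by_cases hdy : d = 'y'
          · subst hdy
            match u with
            | [] => simp [pvStep]
            | e :: v =>
              by_cases hea : e = 'a'
              · exfalso; subst hea
                exact h3 ⟨by simp, by simp [pvCando]⟩
              · simp [pvStep, hea, pv_dead_run]
          · simp [pvStep, hdy, pv_dead_run]
      · by_cases hcw : c = 'w'
        · subst hcw
          match t with
          | [] => simp [pvStep]
          | d :: u =>
            by_cases hdo : d = 'o'
            · subst hdo
              match u with
              | [] => simp [pvStep]
              | e :: v =>
                by_cases heo : e = 'o'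
                · exfalso; subst heo
                  exact h3 ⟨by simp, by simp [pvCando]⟩
                · simp [pvStep, heo, pv_dead_run]
            · simp [pvStep, hdo, pv_dead_run]
        · by_cases hcy : c = 'y'
          · subst hcy
            match t with
            | [] => simp [pvStep]
            | d :: u =>
              by_cases hde : d = 'e'
              · exfalso; subst hde
                exact h2 ⟨by simp, by simp [pvCando]⟩
              · simp [pvStep, hde, pv_dead_run]
          · by_cases hcm : c = 'm'
            · subst hcm
              match t with
              | [] => simp [pvStep]
              | d :: u =>
                by_cases hda : d = 'a'
                · exfalso; subst hda
                  exact h2 ⟨by simp, by simp [pvCando]⟩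
                · simp [pvStep, hda, pv_dead_run]
            · simp [pvStep, hca, hcw, hcy, hcm, pv_dead_run]

theorem pv_fold_eq (l : List String) (n : Int) :
    l.foldl (fun count bab => if pvOkA bab.toList then count + 1 else count) n =
    l.foldl (fun count bab =>
      if bab.toList.foldl pvStep PvSt.s0 = PvSt.s0 then count + 1 else count) n := by
  induction l generalizing n with
  | nil => rfl
  | cons b t ih => simp [List.foldl, pvOkA_eq_dfa]

-- ===== VERDICT (by name: the statement is the Claim_ definition above) =====
theorem solution_spec : Claim_equal_solution := by
  intro babbling _
  unfold Spec_solution solution solution_alt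
  exact pv_fold_eq babbling 0
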